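-- pv_equiv track=rewrite | github.com/deliaelena08/University | Semester 1/FP/python.py | ziua_sumei_maxime
-- ===== SOURCE A (Python) =====
-- def ziua_sumei_maxime(cheltuiala_list):
--     max=0
--     ziua=0
--     for i in cheltuiala_list:
--         if max<i['suma']:
--             max=i['suma']
--             ziua=i['ziua']
--     return ziua
-- ===== SOURCE B (Python) =====
-- def ziua_sumei_maxime(cheltuiala_list):
--     if not cheltuiala_list:
--         return 0
--     best = sorted(cheltuiala_list, key=lambda x: x['suma'], reverse=True)[0]
--     return best['ziua'] if best['suma'] > 0 else 0
-- ===== Notes on version B (the rewrite author's own statement) =====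
-- stated objective: alternative
-- what changed: Replaces the running-max accumulator scan by a stable descending sort on 'suma' followed by picking the first element (first-among-ties winner), keeping the strict >0 floor.
import Mathlib
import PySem

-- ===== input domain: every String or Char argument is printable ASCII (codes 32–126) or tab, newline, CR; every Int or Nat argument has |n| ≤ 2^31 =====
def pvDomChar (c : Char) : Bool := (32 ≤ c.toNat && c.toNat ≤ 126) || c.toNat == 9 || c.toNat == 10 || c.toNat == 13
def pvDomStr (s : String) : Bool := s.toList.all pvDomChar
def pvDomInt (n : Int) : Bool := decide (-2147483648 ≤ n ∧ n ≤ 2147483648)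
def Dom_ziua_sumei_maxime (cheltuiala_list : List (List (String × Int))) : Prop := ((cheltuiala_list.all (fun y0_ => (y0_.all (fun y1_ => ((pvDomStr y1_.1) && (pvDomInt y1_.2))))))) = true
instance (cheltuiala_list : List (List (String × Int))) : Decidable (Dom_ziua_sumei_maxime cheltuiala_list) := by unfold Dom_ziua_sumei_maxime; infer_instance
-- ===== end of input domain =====

-- B replaces A's running-max scan by a stable descending sort on 'suma' and picks the
-- first element (same first-among-ties winner and >0 floor); objective: alternative.

-- shared lookup helpers: i['suma'] / i['ziua'] (total via getD; Pre_ keeps the keys present)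
def pvSuma (d : List (String × Int)) : Int := PySem.Dict.getD (PySem.Dict.mk d) "suma" 0
def pvZiua (d : List (String × Int)) : Int := PySem.Dict.getD (PySem.Dict.mk d) "ziua" 0

-- ===== PORT A =====
def ziua_sumei_maxime (cheltuiala_list : List (List (String × Int))) : Int :=
  (cheltuiala_list.foldl
    (fun st i => if st.1 < pvSuma i then (pvSuma i, pvZiua i) else st)
    ((0 : Int), (0 : Int))).2

-- ===== PORT B =====
def ziua_sumei_maxime_alt (cheltuiala_list : List (List (String × Int))) : Int :=
  match cheltuiala_list with
  | [] => 0
  | _ :: _ =>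
    match PySem.List.sorted cheltuiala_list pvSuma true with
    | [] => 0
    | best :: _ => if 0 < pvSuma best then pvZiua best else 0

-- ===== PRECONDITION & SPEC =====
-- Pre_ is exactly Python A's domain: every entry has key 'suma' (else the loop raises
-- KeyError), and every "record" entry -- positive suma strictly greater than all earlier
-- sumas, i.e. exactly the entries whose 'ziua' A reads -- has key 'ziua'.
def Pre_ziua_sumei_maxime (cheltuiala_list : List (List (String × Int))) : Prop :=
  ∀ i, (hi : i < cheltuiala_list.length) →
    (PySem.Dict.mk cheltuiala_list[i]).contains "suma" = true ∧
    ((0 < pvSuma cheltuiala_list[i] ∧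
        ∀ j, (hj : j < i) → pvSuma (cheltuiala_list[j]'(by omega)) < pvSuma cheltuiala_list[i]) →
      (PySem.Dict.mk cheltuiala_list[i]).contains "ziua" = true)
instance (cheltuiala_list : List (List (String × Int))) : Decidable (Pre_ziua_sumei_maxime cheltuiala_list) := by unfold Pre_ziua_sumei_maxime; infer_instance
def pvWitness_ziua_sumei_maxime : (List (List (String × Int))) :=
  [[("suma", 3), ("ziua", 1)], [("suma", 3), ("ziua", 2)]]
def Spec_ziua_sumei_maxime (cheltuiala_list : List (List (String × Int))) (out : Int) : Prop := out = ziua_sumei_maxime_alt cheltuiala_list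
instance (cheltuiala_list : List (List (String × Int))) (out : Int) : Decidable (Spec_ziua_sumei_maxime cheltuiala_list out) := by unfold Spec_ziua_sumei_maxime; infer_instance

-- ===== CLAIM (what is proved, stated in full; the proofs are below) =====
def Claim_equal_ziua_sumei_maxime : Prop := ∀ (cheltuiala_list : List (List (String × Int))), Dom_ziua_sumei_maxime cheltuiala_list → Pre_ziua_sumei_maxime cheltuiala_list → Spec_ziua_sumei_maxime cheltuiala_list (ziua_sumei_maxime cheltuiala_list)

-- ===== LEMMAS AND PROOFS =====

-- the relation between B's insertion-sort accumulator and A's (max, ziua) state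
def pvRel (acc : List (List (String × Int))) (st : Int × Int) : Prop :=
  match acc with
  | [] => st = (0, 0)
  | h :: _ =>
      st.1 = max 0 (pvSuma h) ∧ (0 < pvSuma h → st.2 = pvZiua h) ∧
      (pvSuma h ≤ 0 → st = (0, 0))

theorem pvRel_step (acc : List (List (String × Int))) (st : Int × Int)
    (x : List (String × Int)) (h : pvRel acc st) :
    pvRel (PySem.List.insertBy (fun a b => decide (pvSuma b < pvSuma a)) x acc)
      (if st.1 < pvSuma x then (pvSuma x, pvZiua x) else st) := by
  cases acc with
  | nil =>
      simp only [pvRel] at h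
      subst h
      simp only [PySem.List.insertBy, pvRel]
      split_ifs with h1 <;> simp <;> omega
  | cons hd tl =>
      simp only [pvRel] at h
      obtain ⟨h1, h2, h3⟩ := h
      simp only [PySem.List.insertBy]
      by_cases hc : pvSuma hd < pvSuma x
      · simp only [hc, decide_true, if_true, pvRel]
        by_cases hx : 0 < pvSuma x
        · have : st.1 < pvSuma x := by omega
          simp only [this, if_true]
          exact ⟨by omega, fun _ => trivial, by omega⟩
        · have hst : st = (0, 0) := h3 (by omega)
          have : ¬ st.1 < pvSuma x := by rw [hst]; simp; omega
          simp only [this, if_false]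
          refine ⟨by rw [hst]; simp; omega, by omega, fun _ => hst⟩
      · simp only [hc, decide_false, pvRel]
        have : ¬ st.1 < pvSuma x := by omega
        simp only [this, if_false]
        exact ⟨h1, h2, h3⟩

theorem pvRel_fold (l : List (List (String × Int))) :
    ∀ (acc : List (List (String × Int))) (st : Int × Int), pvRel acc st →
    pvRel (l.foldl (fun acc x => PySem.List.insertBy (fun a b => decide (pvSuma b < pvSuma a)) x acc) acc)
      (l.foldl (fun st i => if st.1 < pvSuma i then (pvSuma i, pvZiua i) else st) st) := by
  induction l with
  | nil => intro acc st h; simpa using h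
  | cons x xs ih =>
      intro acc st h
      simp only [List.foldl_cons]
      exact ih _ _ (pvRel_step acc st x h)

theorem pv_main (l : List (List (String × Int))) :
    ziua_sumei_maxime l = ziua_sumei_maxime_alt l := by
  have hrel := pvRel_fold l [] ((0 : Int), (0 : Int)) (by simp [pvRel])
  have hsorted := PySem.List.sorted_rev_eq_foldl_insertBy l pvSuma
  unfold ziua_sumei_maxime ziua_sumei_maxime_alt
  cases l with
  | nil => rfl
  | cons a as =>
      rw [hsorted]
      rcases hfold : (a :: as).foldl
          (fun acc x => PySem.List.insertBy (fun a b => decide (pvSuma b < pvSuma a)) x acc) [] with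
        _ | ⟨best, rest⟩
      · rw [hfold] at hrel
        simp only [pvRel] at hrel
        rw [hrel]
      · rw [hfold] at hrel
        simp only [pvRel] at hrel
        obtain ⟨h1, h2, h3⟩ := hrel
        by_cases hb : 0 < pvSuma best
        · simp only [hb, if_true]
          exact h2 hb
        · simp only [hb, if_false]
          have := h3 (by omega)
          rw [this]

-- ===== VERDICT (by name: the statement is the Claim_ definition above) =====
theorem ziua_sumei_maxime_spec : Claim_equal_ziua_sumei_maxime := by
  intro l _ _
  unfold Spec_ziua_sumei_maxime
  exact pv_main l
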